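-- pv_equiv track=rewrite | github.com/Klumpe-lab/crboost_server | services/computing/slurm_service.py | normalize_slurm_ids
-- ===== SOURCE A (Python) =====
-- from typing import ClassVar, Dict, List, Any, Optional
--
-- def normalize_slurm_ids(job_ids: List[str]) -> List[str]:
--     """
--     Deduplicate SLURM job IDs by normalizing array task IDs to their parent.
--
--     Array tasks look like '28666490_1', '28666490_[3-14%8]', etc.
--     Normalizing to '28666490' ensures a single scancel kills the entire array.
--     Non-array IDs (e.g., '28666489') pass through unchanged.
--
--     Example:
--         ['28666489', '28666490_1', '28666490_2', '28666490_[3-14%8]']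
--         → ['28666489', '28666490']
--     """
--     result: set = set()
--     for jid in job_ids:
--         if "_" in jid:
--             result.add(jid.split("_", 1)[0])
--         else:
--             result.add(jid)
--     return sorted(result)
-- ===== SOURCE B (Python) =====
-- def normalize_slurm_ids(job_ids):
--     """Normalize array job IDs to their parent, deduplicate, return sorted.
--
--     Sorts the normalized ids first, then removes adjacent duplicates in one
--     scan, instead of maintaining a set.
--     """
--     normalized = [jid.split("_", 1)[0] if "_" in jid else jid for jid in job_ids]
--     normalized.sort()
--     out = []
--     for x in normalized:
--         if not out or out[-1] != x:
--             out.append(x)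
--     return out
-- ===== Notes on version B (the rewrite author's own statement) =====
-- stated objective: alternative
-- what changed: Instead of accumulating normalized ids in a set and sorting the set, B maps every id to its normalized form, sorts the whole list, and deduplicates by a single adjacent-equality scan over the sorted list.
import Mathlib
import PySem

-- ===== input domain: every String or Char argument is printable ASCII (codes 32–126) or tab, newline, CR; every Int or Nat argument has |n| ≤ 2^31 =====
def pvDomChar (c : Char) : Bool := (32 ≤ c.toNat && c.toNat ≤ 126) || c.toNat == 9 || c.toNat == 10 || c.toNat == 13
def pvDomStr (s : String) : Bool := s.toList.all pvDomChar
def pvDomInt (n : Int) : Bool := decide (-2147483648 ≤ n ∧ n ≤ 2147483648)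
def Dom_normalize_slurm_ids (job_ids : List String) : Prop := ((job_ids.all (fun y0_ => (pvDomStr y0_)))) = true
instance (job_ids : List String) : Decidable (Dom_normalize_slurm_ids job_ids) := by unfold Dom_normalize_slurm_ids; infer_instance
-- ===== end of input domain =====

-- B sorts the list of normalized ids and removes adjacent duplicates in one scan,
-- instead of A's set accumulation followed by sorting the set (alternative decomposition, same cost).

-- ===== PORT A =====
def normalize_slurm_ids (job_ids : List String) : List String :=
  let result : PySem.Set String := job_ids.foldl (fun result jid =>
    if PySem.Str.isIn "_" jid then
      -- jid.split("_", 1)[0]: splitting on the nonempty separator "_" always returns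
      -- some nonempty list, so the [0] never raises; the getD/headD defaults are unreachable
      PySem.Set.add result (((PySem.Str.splitMax? jid "_" 1).getD []).headD "")
    else
      PySem.Set.add result jid) PySem.Set.empty
  PySem.List.sorted result (fun x => x) false

-- ===== PORT B =====
-- the comprehension's per-element expression: jid.split("_", 1)[0] if "_" in jid else jid
def pvNormB (jid : String) : String :=
  if PySem.Str.isIn "_" jid then ((PySem.Str.splitMax? jid "_" 1).getD []).headD "" else jid

def normalize_slurm_ids_alt (job_ids : List String) : List String :=
  let normalized := PySem.List.sorted (job_ids.map pvNormB) (fun x => x) false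
  -- for x in normalized: if not out or out[-1] != x: out.append(x)
  -- (out[-1] on the nonempty out ported as getLast?)
  normalized.foldl (fun out x =>
    if out = [] ∨ out.getLast? ≠ some x then out ++ [x] else out) []

-- ===== PRECONDITION & SPEC =====
def Spec_normalize_slurm_ids (job_ids : List String) (out : List String) : Prop := out = normalize_slurm_ids_alt job_ids
instance (job_ids : List String) (out : List String) : Decidable (Spec_normalize_slurm_ids job_ids out) := by unfold Spec_normalize_slurm_ids; infer_instance

-- ===== CLAIM (what is proved, stated in full; the proofs are below) =====
def Claim_equal_normalize_slurm_ids : Prop := ∀ (job_ids : List String), Dom_normalize_slurm_ids job_ids → Spec_normalize_slurm_ids job_ids (normalize_slurm_ids job_ids)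

-- ===== LEMMAS AND PROOFS =====

-- in a strictly increasing list every element is ≤ the last element
lemma pv_le_getLast_of_pairwise_lt {a : String} {l : List String}
    (h : l.Pairwise (· < ·)) (ha : a ∈ l) (hne : l ≠ []) : a ≤ l.getLast hne := by
  induction l with
  | nil => simp at ha
  | cons x t ih =>
    rcases List.mem_cons.mp ha with rfl | hat
    · cases t with
      | nil => simp [List.getLast]
      | cons y t' =>
        have : a < (y :: t').getLast (by simp) :=
          (List.pairwise_cons.mp h).1 _ (List.getLast_mem _)
        simpa [List.getLast_cons] using this.le
    · have hne' : t ≠ [] := List.ne_nil_of_mem hat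
      have := ih (List.pairwise_cons.mp h).2 hat hne'
      simpa [List.getLast_cons hne'] using this

-- invariant of B's dedup loop over a non-decreasing list: the accumulator stays strictly
-- increasing and collects exactly the elements seen so far
lemma pv_fold_invariant : ∀ (xs out : List String),
    xs.Pairwise (· ≤ ·) → out.Pairwise (· < ·) →
    (∀ a ∈ out, ∀ b ∈ xs, a ≤ b) →
    (xs.foldl (fun out x => if out = [] ∨ out.getLast? ≠ some x then out ++ [x] else out) out).Pairwise (· < ·)
    ∧ ∀ y, (y ∈ xs.foldl (fun out x => if out = [] ∨ out.getLast? ≠ some x then out ++ [x] else out) out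
            ↔ y ∈ out ∨ y ∈ xs) := by
  intro xs
  induction xs with
  | nil => intro out _ hout _; simpa using hout
  | cons x t ih =>
    intro out hx hout hle
    have hx1 : ∀ b ∈ t, x ≤ b := (List.pairwise_cons.mp hx).1
    have hx2 : t.Pairwise (· ≤ ·) := (List.pairwise_cons.mp hx).2
    by_cases hc : out = [] ∨ out.getLast? ≠ some x
    · -- element appended
      have hlt : ∀ a ∈ out, a < x := by
        intro a hao
        have hne : out ≠ [] := List.ne_nil_of_mem hao
        have hax : a ≤ x := hle a hao x (List.mem_cons_self ..)
        rcases lt_or_eq_of_le hax with h | rfl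
        · exact h
        · exfalso
          have hlast : a ≤ out.getLast hne := pv_le_getLast_of_pairwise_lt hout hao hne
          have hlx : out.getLast hne ≤ a :=
            hle _ (List.getLast_mem hne) a (List.mem_cons_self ..)
          have : out.getLast? = some a := by
            rw [List.getLast?_eq_some_getLast hne]
            exact congrArg some (le_antisymm hlx hlast)
          rcases hc with h0 | h0
          · exact hne h0
          · exact h0 this
      have hout' : (out ++ [x]).Pairwise (· < ·) := by
        rw [List.pairwise_append]
        exact ⟨hout, List.pairwise_singleton _ _, by simpa using hlt⟩
      have hle' : ∀ a ∈ out ++ [x], ∀ b ∈ t, a ≤ b := by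
        intro a ha b hb
        rcases List.mem_append.mp ha with h | h
        · exact hle a h b (List.mem_cons_of_mem _ hb)
        · simp at h; subst h; exact hx1 b hb
      have := ih (out ++ [x]) hx2 hout' hle'
      refine ⟨by simpa [List.foldl_cons, hc] using this.1, ?_⟩
      intro y
      have hm := this.2 y
      simp only [List.foldl_cons, if_pos hc]
      rw [hm]
      simp [List.mem_append, or_assoc, or_comm, or_left_comm]
    · -- skipped: x equals out's last element, so x ∈ out already
      rw [not_or, not_ne_iff] at hc
      obtain ⟨hne, hlast⟩ := hc
      have hcond : ¬ (out = [] ∨ out.getLast? ≠ some x) := by simp [hne, hlast]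
      have hxmem : x ∈ out := by
        have hxeq : out.getLast hne = x := by
          rw [List.getLast?_eq_some_getLast hne] at hlast
          exact Option.some.inj hlast
        exact hxeq ▸ List.getLast_mem hne
      have hle' : ∀ a ∈ out, ∀ b ∈ t, a ≤ b :=
        fun a ha b hb => hle a ha b (List.mem_cons_of_mem _ hb)
      have hinv := ih out hx2 hout hle'
      rw [List.foldl_cons, if_neg hcond]
      refine ⟨hinv.1, ?_⟩
      intro y
      rw [hinv.2 y]
      constructor
      · rintro (h | h)
        · exact Or.inl h
        · exact Or.inr (List.mem_cons_of_mem _ h)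
      · rintro (h | h)
        · exact Or.inl h
        · rcases List.mem_cons.mp h with rfl | h
          · exact Or.inl hxmem
          · exact Or.inr h

-- A's loop builds exactly set(map(pvNormB, job_ids))
lemma pv_A_eq_sorted_ofList (job_ids : List String) :
    normalize_slurm_ids job_ids
      = PySem.List.sorted (PySem.Set.ofList (job_ids.map pvNormB)) (fun x => x) false := by
  unfold normalize_slurm_ids
  have h : job_ids.foldl (fun result jid =>
      if PySem.Str.isIn "_" jid then
        PySem.Set.add result (((PySem.Str.splitMax? jid "_" 1).getD []).headD "")
      else
        PySem.Set.add result jid) PySem.Set.empty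
      = PySem.Set.ofList (job_ids.map pvNormB) := by
    have hf : (fun (result : PySem.Set String) jid =>
        if PySem.Str.isIn "_" jid then
          PySem.Set.add result (((PySem.Str.splitMax? jid "_" 1).getD []).headD "")
        else
          PySem.Set.add result jid)
        = fun (result : PySem.Set String) jid => PySem.Set.add result (pvNormB jid) := by
      funext result jid
      simp only [pvNormB, apply_ite (PySem.Set.add result)]
    rw [hf, ← PySem.Set.update_map_eq_foldl_add, PySem.Set.update_empty]
  rw [h]

theorem pv_main (job_ids : List String) :
    normalize_slurm_ids job_ids = normalize_slurm_ids_alt job_ids := by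
  have halt : normalize_slurm_ids_alt job_ids
      = (PySem.List.sorted (job_ids.map pvNormB) (fun x => x) false).foldl
          (fun out x => if out = [] ∨ out.getLast? ≠ some x then out ++ [x] else out) [] := rfl
  rw [pv_A_eq_sorted_ofList, halt]
  set m := job_ids.map pvNormB with hm
  set s := PySem.List.sorted m (fun x => x) false with hs
  have hxs : s.Pairwise (· ≤ ·) := by
    have := PySem.List.sorted_pairwise (xs := m) (key := fun x => x)
    simpa using this
  obtain ⟨hpw, hmem⟩ := pv_fold_invariant s [] hxs (List.Pairwise.nil) (by simp)
  apply PySem.List.sorted_eq_of_perm_of_pairwise_lt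
  · -- permutation: both nodup, same members
    rw [List.perm_ext_iff_of_nodup (List.Pairwise.imp ne_of_lt hpw) (PySem.Set.nodup_ofList m)]
    intro y
    rw [hmem y, hs]
    simp [PySem.List.mem_sorted, PySem.Set.mem_ofList]
  · simpa using hpw

-- ===== VERDICT (by name: the statement is the Claim_ definition above) =====
theorem normalize_slurm_ids_spec : Claim_equal_normalize_slurm_ids := by
  intro job_ids _
  unfold Spec_normalize_slurm_ids
  exact pv_main job_ids
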